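-- pv_equiv track=rewrite | github.com/NathanMacDiarmid/SYSC4810 | Encrypt.py | checkForLicencePlate
-- ===== SOURCE A (Python) =====
-- def checkForLicencePlate(passwd) -> bool:
--     letterCount = 0
--     numberCount = 0
--     curr = 0
--     prev = 0
--     for elem in passwd:
--         if (letterCount == 4):
--             if (elem.isnumeric()):
--                 numberCount += 1
--             elif (passwd[curr].isnumeric() and passwd[prev].isnumeric() and numberCount > 0):
--                 numberCount += 1
--             else:
--                 numberCount = 0
--         else:
--             if (elem.isalpha()):
--                 letterCount += 1
--             elif (passwd[curr].isalpha() and passwd[prev].isalpha() and letterCount > 0):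
--                 letterCount += 1
--             elif (letterCount != 4):
--                 letterCount = 0
--         if (letterCount == 4 and numberCount == 3):
--             return False
--         curr += 1
--         prev = curr - 1
--     return True
-- ===== SOURCE B (Python) =====
-- def checkForLicencePlate(passwd) -> bool:
--     # Phase 1: find the first run of 4 consecutive alphabetic characters.
--     n = len(passwd)
--     run = 0
--     i = 0
--     while i < n and run < 4:
--         run = run + 1 if passwd[i].isalpha() else 0
--         i += 1
--     if run < 4:
--         return True
--     # Phase 2: look for a run of 3 consecutive numeric characters afterwards.
--     digits = 0
--     for ch in passwd[i:]:
--         if ch.isnumeric():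
--             digits += 1
--             if digits == 3:
--                 return False
--         else:
--             digits = 0
--     return True
-- ===== Notes on version B (the rewrite author's own statement) =====
-- stated objective: simpler
-- what changed: Replaced A's single fused loop with dead prev/curr look-back branches (the elif conditions can never fire because elem == passwd[curr]) by two explicit scans: first find the end of the first run of 4 consecutive letters, then scan the rest for a run of 3 consecutive digits.
import Mathlib
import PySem

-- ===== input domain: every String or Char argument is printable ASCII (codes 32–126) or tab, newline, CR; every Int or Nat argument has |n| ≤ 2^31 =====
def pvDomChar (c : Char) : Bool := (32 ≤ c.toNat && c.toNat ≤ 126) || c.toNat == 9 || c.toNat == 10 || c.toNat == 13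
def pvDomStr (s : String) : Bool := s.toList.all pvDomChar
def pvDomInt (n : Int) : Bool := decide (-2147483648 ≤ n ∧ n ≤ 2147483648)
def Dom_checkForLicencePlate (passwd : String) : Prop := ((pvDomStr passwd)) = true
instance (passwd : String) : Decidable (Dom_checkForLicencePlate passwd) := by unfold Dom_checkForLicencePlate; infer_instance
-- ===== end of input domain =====

-- B replaces A's fused loop (whose prev/curr look-back branches never fire) by two explicit
-- scans — find the first run of 4 letters, then look for a run of 3 digits after it — for clarity.
-- On the printable-ASCII domain Python's isnumeric coincides with isdigit (ported as isdigit).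

-- ===== PORT A =====
-- A's loop; elem iterates over passwd, curr/prev are A's indices. passwd[curr]/passwd[prev]
-- are ported with pyGet? (the none case, Python's IndexError, is unreachable: curr is the
-- position of elem; .any pred then matches Python's truth value exactly).
def pvLoopA (passwd : String) (cs : List Char) (letterCount numberCount : Nat)
    (curr prev : Int) : Bool :=
  match cs with
  | [] => true
  | elem :: rest =>
    let st :=
      if letterCount == 4 then
        if PySem.Chars.isdigit elem then (letterCount, numberCount + 1)
        else if (PySem.Str.pyGet? passwd curr).any PySem.Chars.isdigit &&
                (PySem.Str.pyGet? passwd prev).any PySem.Chars.isdigit &&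
                decide (numberCount > 0) then (letterCount, numberCount + 1)
        else (letterCount, 0)
      else
        if PySem.Chars.isalpha elem then (letterCount + 1, numberCount)
        else if (PySem.Str.pyGet? passwd curr).any PySem.Chars.isalpha &&
                (PySem.Str.pyGet? passwd prev).any PySem.Chars.isalpha &&
                decide (letterCount > 0) then (letterCount + 1, numberCount)
        else if letterCount != 4 then (0, numberCount)
        else (letterCount, numberCount)
    if st.1 == 4 && st.2 == 3 then false
    else pvLoopA passwd rest st.1 st.2 (curr + 1) ((curr + 1) - 1)

def checkForLicencePlate (passwd : String) : Bool :=
  pvLoopA passwd passwd.toList 0 0 0 0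

-- ===== PORT B =====
-- phase 1: the while loop ('i < n and run < 4'), returning (run, i)
def pvAltP1 (cs : List Char) (run i : Nat) : Nat × Nat :=
  match cs with
  | [] => (run, i)
  | c :: rest =>
    if run < 4 then pvAltP1 rest (if PySem.Chars.isalpha c then run + 1 else 0) (i + 1)
    else (run, i)

-- phase 2: the for loop over passwd[i:]
def pvAltP2 (cs : List Char) (digits : Nat) : Bool :=
  match cs with
  | [] => true
  | c :: rest =>
    if PySem.Chars.isdigit c then
      if digits + 1 == 3 then false else pvAltP2 rest (digits + 1)
    else pvAltP2 rest 0

def checkForLicencePlate_alt (passwd : String) : Bool :=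
  let cs := passwd.toList
  let p := pvAltP1 cs 0 0
  if p.1 < 4 then true
  else pvAltP2 (PySem.List.slice cs (some (p.2 : Int)) none) 0

-- ===== PRECONDITION & SPEC =====
def Spec_checkForLicencePlate (passwd : String) (out : Bool) : Prop := out = checkForLicencePlate_alt passwd
instance (passwd : String) (out : Bool) : Decidable (Spec_checkForLicencePlate passwd out) := by unfold Spec_checkForLicencePlate; infer_instance

-- ===== CLAIM (what is proved, stated in full; the proofs are below) =====
def Claim_equal_checkForLicencePlate : Prop := ∀ (passwd : String), Dom_checkForLicencePlate passwd → Spec_checkForLicencePlate passwd (checkForLicencePlate passwd)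

-- ===== LEMMAS AND PROOFS =====

-- A's loop with the dead look-back branches removed
def pvSLoop (cs : List Char) (lc nc : Nat) : Bool :=
  match cs with
  | [] => true
  | elem :: rest =>
    let st :=
      if lc == 4 then (lc, if PySem.Chars.isdigit elem then nc + 1 else 0)
      else ((if PySem.Chars.isalpha elem then lc + 1 else 0), nc)
    if st.1 == 4 && st.2 == 3 then false
    else pvSLoop rest st.1 st.2

-- Since curr is the index of elem, passwd[curr] = elem; elem already failed the first test,
-- so each elif's guard is false and pvLoopA collapses to pvSLoop.
theorem pvLoopA_eq_sLoop (passwd : String) :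
    ∀ (cs : List Char) (lc nc : Nat) (k : Nat) (prev : Int),
      passwd.toList.drop k = cs →
      pvLoopA passwd cs lc nc (k : Int) prev = pvSLoop cs lc nc := by
  intro cs
  induction cs with
  | nil => intro lc nc k prev _; simp [pvLoopA, pvSLoop]
  | cons elem rest ih =>
    intro lc nc k prev hdrop
    have hget : passwd.toList[k]? = some elem := by
      rw [← List.head?_drop, hdrop]; rfl
    have hpy : PySem.Str.pyGet? passwd (k : Int) = some elem := by
      simp [PySem.Str.pyGet?_eq, PySem.Chars.pyGet?_eq_listPyGet?,
        PySem.List.pyGet?_natCast, hget]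
    have hdrop' : passwd.toList.drop (k + 1) = rest := by
      have : passwd.toList.drop (k+1) = (passwd.toList.drop k).drop 1 := by
        rw [List.drop_drop]
      rw [this, hdrop]; rfl
    have hk1 : ((k : Int) + 1) = ((k + 1 : Nat) : Int) := by push_cast; ring
    rw [pvLoopA, pvSLoop]
    by_cases hlc : lc == 4
    · by_cases hd : PySem.Chars.isdigit elem
      · simp only [hlc, hd, if_true]
        split
        · rfl
        · rw [hk1]; exact ih _ _ _ _ hdrop'
      · simp only [hlc, hpy, hd, Option.any_some, Bool.false_and, if_true,
          Bool.false_eq_true, if_false]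
        split
        · rfl
        · rw [hk1]; exact ih _ _ _ _ hdrop'
    · by_cases ha : PySem.Chars.isalpha elem
      · simp only [hlc, ha, if_true, Bool.false_eq_true, if_false]
        split
        · rfl
        · rw [hk1]; exact ih _ _ _ _ hdrop'
      · have hne : (lc != 4) = true := by
          simp only [bne_iff_ne, ne_eq]
          intro h; rw [h] at hlc; simp at hlc
        simp only [hlc, ha, hpy, hne, Option.any_some, Bool.false_and, if_true,
          Bool.false_eq_true, if_false]
        split
        · rfl
        · rw [hk1]; exact ih _ _ _ _ hdrop'

-- once four letters are found, A's remaining loop is exactly B's phase 2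
theorem pvSLoop_four (cs : List Char) : ∀ nc : Nat, pvSLoop cs (4 : Nat) nc = pvAltP2 cs nc := by
  induction cs with
  | nil => intro nc; rfl
  | cons c rest ih =>
    intro nc
    rw [pvSLoop, pvAltP2]
    by_cases hd : PySem.Chars.isdigit c
    · by_cases h3 : nc + 1 = 3
      · simp [hd, h3]
      · simp [hd, ih]
    · simp only [hd, Bool.false_eq_true, if_false]
      simpa using ih 0

-- the letter-seeking phase of A matches B's phase 1 followed by phase 2
theorem pvSLoop_seek (full : List Char) :
    ∀ (cs : List Char) (run i : Nat), full.drop i = cs → run < 4 →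
      pvSLoop cs run 0 =
        (let p := pvAltP1 cs run i
         if p.1 < 4 then true else pvAltP2 (full.drop p.2) 0) := by
  intro cs
  induction cs with
  | nil => intro run i _ hrun; simp [pvSLoop, pvAltP1, hrun]
  | cons c rest ih =>
    intro run i hdrop hrun
    have hdrop' : full.drop (i + 1) = rest := by
      have : full.drop (i+1) = (full.drop i).drop 1 := by rw [List.drop_drop]
      rw [this, hdrop]; rfl
    have hlc : (run == 4) = false := by simp; omega
    rw [pvSLoop]
    simp only [hlc, Bool.false_eq_true, if_false]
    set run' := if PySem.Chars.isalpha c then run + 1 else 0 with hrun'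
    have hnc3 : ((run' == 4) && ((0:Nat) == 3)) = false := by simp
    rw [hnc3]
    simp only [Bool.false_eq_true, if_false]
    rw [pvAltP1]
    simp only [if_pos hrun]
    by_cases h4 : run' < 4
    · exact ih run' (i+1) hdrop' h4
    · have hr4 : run' = 4 := by
        by_cases ha : PySem.Chars.isalpha c <;> simp [hrun', ha] at h4 ⊢; omega
      have hstop : pvAltP1 rest run' (i + 1) = (run', i + 1) := by
        cases rest with
        | nil => rfl
        | cons d ds => rw [pvAltP1]; simp [hr4]
      conv_rhs => rw [← hrun']
      rw [hr4] at hstop ⊢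
      rw [pvSLoop_four, hstop]
      simp [hdrop']

-- ===== VERDICT (by name: the statement is the Claim_ definition above) =====
theorem checkForLicencePlate_spec : Claim_equal_checkForLicencePlate := by
  intro passwd _
  unfold Spec_checkForLicencePlate checkForLicencePlate checkForLicencePlate_alt
  have hA := pvLoopA_eq_sLoop passwd passwd.toList 0 0 0 0 (by simp)
  simp only [Nat.cast_zero] at hA
  rw [hA]
  rw [pvSLoop_seek passwd.toList passwd.toList 0 0 (by simp) (by omega)]
  simp [PySem.List.slice_from_natCast]
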